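-- pv_equiv track=rewrite | github.com/vipul-maheshwari/saarthi-ner | postprocessing/time_utils.py | filter_times
-- ===== SOURCE A (Python) =====
-- def filter_times(dates_list):
--     valid_list = []
--     for dates in dates_list:
--         if dates != 'No pattern found' and dates != "Invalid date":
--             valid_list.append(dates)
--     if len(valid_list) == 0:
--         return None
--     return min(valid_list)
-- ===== SOURCE B (Python) =====
-- def filter_times(dates_list):
--     best = None
--     for dates in dates_list:
--         if dates != 'No pattern found' and dates != "Invalid date":
--             if best is None or dates < best:
--                 best = dates
--     return best
-- ===== Notes on version B (the rewrite author's own statement) =====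
-- stated objective: simpler
-- what changed: Replaced the collect-then-reduce pattern (build a filtered list, test its length, call min) with a single fused pass that maintains a running minimum in an Optional accumulator, returning None when no valid entry was seen.
import Mathlib
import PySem

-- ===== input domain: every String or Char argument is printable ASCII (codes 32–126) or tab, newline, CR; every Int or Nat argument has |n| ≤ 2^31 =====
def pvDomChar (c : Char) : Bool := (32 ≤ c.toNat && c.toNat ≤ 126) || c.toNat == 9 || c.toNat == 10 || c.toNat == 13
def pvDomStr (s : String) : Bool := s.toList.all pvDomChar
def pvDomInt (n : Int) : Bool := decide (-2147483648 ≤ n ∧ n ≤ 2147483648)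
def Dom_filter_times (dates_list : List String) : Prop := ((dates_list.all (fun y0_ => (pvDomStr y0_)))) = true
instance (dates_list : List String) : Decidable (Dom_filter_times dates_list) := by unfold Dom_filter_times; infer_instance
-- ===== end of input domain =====

-- B replaces A's build-filtered-list-then-min with one fused pass keeping a running minimum (simpler decomposition, same cost).

-- ===== PORT A =====
def filter_times (dates_list : List String) : Option String :=
  let valid_list := dates_list.foldl
    (fun acc dates =>
      if dates ≠ "No pattern found" ∧ dates ≠ "Invalid date" then acc ++ [dates] else acc) []
  if valid_list.length = 0 then none
  else PySem.List.min? valid_list (fun x => x)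

-- ===== PORT B =====
def filter_times_alt (dates_list : List String) : Option String :=
  dates_list.foldl
    (fun best dates =>
      if dates ≠ "No pattern found" ∧ dates ≠ "Invalid date" then
        match best with
        | none => some dates
        | some b => if dates < b then some dates else some b
      else best) none

-- ===== PRECONDITION & SPEC =====
def Spec_filter_times (dates_list : List String) (out : Option String) : Prop := out = filter_times_alt dates_list
instance (dates_list : List String) (out : Option String) : Decidable (Spec_filter_times dates_list out) := by unfold Spec_filter_times; infer_instance

-- ===== CLAIM (what is proved, stated in full; the proofs are below) =====
def Claim_equal_filter_times : Prop := ∀ (dates_list : List String), Dom_filter_times dates_list → Spec_filter_times dates_list (filter_times dates_list)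

-- ===== LEMMAS AND PROOFS =====

def pvStep (best : Option String) (dates : String) : Option String :=
  if dates ≠ "No pattern found" ∧ dates ≠ "Invalid date" then
    match best with
    | none => some dates
    | some b => if dates < b then some dates else some b
  else best

lemma pvFold_some (xs : List String) : ∀ b : String,
    xs.foldl pvStep (some b) =
      some ((xs.filter (fun d => decide (d ≠ "No pattern found" ∧ d ≠ "Invalid date"))).foldl min b) := by
  induction xs with
  | nil => intro b; rfl
  | cons x t ih =>
    intro b
    by_cases h : x ≠ "No pattern found" ∧ x ≠ "Invalid date"
    · have hd : decide (x ≠ "No pattern found" ∧ x ≠ "Invalid date") = true := by simpa using h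
      simp only [List.foldl_cons, List.filter_cons, hd, if_true]
      rw [show pvStep (some b) x = some (min b x) by
        unfold pvStep; rw [if_pos h]; rcases lt_or_ge x b with h1 | h1
        · simp [h1, le_of_lt h1]
        · simp [not_lt.mpr h1, h1]]
      exact ih (min b x)
    · simp only [List.foldl_cons, List.filter_cons]
      rw [show pvStep (some b) x = some b by unfold pvStep; rw [if_neg h]]
      have : decide (x ≠ "No pattern found" ∧ x ≠ "Invalid date") = false := by
        simpa using h
      rw [this]
      simpa using ih b

lemma pvFold_none (xs : List String) :
    xs.foldl pvStep none =
      match xs.filter (fun d => decide (d ≠ "No pattern found" ∧ d ≠ "Invalid date")) with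
      | [] => none
      | x :: t => some (t.foldl min x) := by
  induction xs with
  | nil => rfl
  | cons x t ih =>
    by_cases h : x ≠ "No pattern found" ∧ x ≠ "Invalid date"
    · have hd : decide (x ≠ "No pattern found" ∧ x ≠ "Invalid date") = true := by simpa using h
      simp only [List.foldl_cons, List.filter_cons, hd, if_true]
      rw [show pvStep none x = some x by unfold pvStep; rw [if_pos h]]
      exact pvFold_some t x
    · simp only [List.foldl_cons, List.filter_cons]
      rw [show pvStep none x = none by unfold pvStep; rw [if_neg h]]
      have : decide (x ≠ "No pattern found" ∧ x ≠ "Invalid date") = false := by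
        simpa using h
      rw [this]
      simpa using ih

lemma pvFoldA (xs : List String) : ∀ acc : List String,
    xs.foldl
      (fun acc dates =>
        if dates ≠ "No pattern found" ∧ dates ≠ "Invalid date" then acc ++ [dates] else acc) acc =
      acc ++ xs.filter (fun d => decide (d ≠ "No pattern found" ∧ d ≠ "Invalid date")) := by
  induction xs with
  | nil => intro acc; simp
  | cons x t ih =>
    intro acc
    by_cases h : x ≠ "No pattern found" ∧ x ≠ "Invalid date"
    · have hd : decide (x ≠ "No pattern found" ∧ x ≠ "Invalid date") = true := by simpa using h
      simp only [List.foldl_cons, List.filter_cons, hd, if_true, if_pos h, ih]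
      simp
    · have hd : decide (x ≠ "No pattern found" ∧ x ≠ "Invalid date") = false := by simpa using h
      simp only [List.foldl_cons, List.filter_cons, hd, if_neg h, ih]
      simp

-- ===== VERDICT (by name: the statement is the Claim_ definition above) =====
theorem filter_times_spec : Claim_equal_filter_times := by
  intro xs _
  unfold Spec_filter_times filter_times filter_times_alt
  rw [show (fun best dates =>
      if dates ≠ "No pattern found" ∧ dates ≠ "Invalid date" then
        match best with
        | none => some dates
        | some b => if dates < b then some dates else some b
      else best) = pvStep from rfl]
  rw [pvFold_none, pvFoldA]
  simp only [List.nil_append]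
  cases h : xs.filter (fun d => decide (d ≠ "No pattern found" ∧ d ≠ "Invalid date")) with
  | nil => simp
  | cons y t => simp [PySem.List.min?_id_cons]
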